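-- pv_equiv track=rewrite | github.com/abhikonkal/leetcode-github-abhinav | 2140. Solving Questions With Brainpower.py | mostPoints
-- ===== SOURCE A (Python) =====
-- from typing import List
--
-- def mostPoints(questions: List[List[int]]) -> int:
--     dp=[0]*(len(questions)+1)
--     max_sum=0
--
--     for i in range(len(questions)-1,-1,-1):
--         future=questions[i][1]+1+i
--         if future>=len(questions):
--             dp[i]=questions[i][0]
--         else:
--             dp[i]=questions[i][0]+dp[future]
--         max_sum=max(max_sum,dp[i])
--
--         dp[i]=max(dp[i],dp[i+1])
--
--
--
--     return max_sum
-- ===== SOURCE B (Python) =====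
-- def mostPoints(questions):
--     n = len(questions)
--     dp = [0] * (n + 1)   # dp[k]: best total after committing decisions up to position k
--     for i, q in enumerate(questions):
--         if dp[i] > dp[i + 1]:          # skip question i
--             dp[i + 1] = dp[i]
--         j = min(n, i + q[1] + 1)       # take question i, jump past its penalty
--         t = dp[i] + q[0]
--         if t > dp[j]:
--             dp[j] = t
--     return dp[n]
-- ===== Notes on version B (the rewrite author's own statement) =====
-- stated objective: alternative
-- what changed: Replaced A's backward pull-DP (suffix-max array plus a running max_sum) by a forward push-DP over dp[0..n] that propagates skip and take moves ahead and returns dp[n].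
-- outside the precondition, e.g. on mostPoints([[5, -1]]): A returns 5, B returns 0; on mostPoints([[5]]): A raises IndexError, B raises IndexError
import Mathlib
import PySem

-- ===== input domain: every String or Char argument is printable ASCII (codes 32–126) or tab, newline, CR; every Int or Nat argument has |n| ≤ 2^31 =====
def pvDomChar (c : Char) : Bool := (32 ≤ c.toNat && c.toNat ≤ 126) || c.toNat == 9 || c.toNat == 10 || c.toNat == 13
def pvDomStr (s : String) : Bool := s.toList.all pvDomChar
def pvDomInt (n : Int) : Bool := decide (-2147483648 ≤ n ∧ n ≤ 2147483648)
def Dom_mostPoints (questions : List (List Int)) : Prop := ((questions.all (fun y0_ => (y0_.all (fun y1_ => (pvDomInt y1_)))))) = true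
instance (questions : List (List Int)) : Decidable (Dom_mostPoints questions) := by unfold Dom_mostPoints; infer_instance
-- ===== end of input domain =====

-- B replaces A's backward pull-DP with a forward push-DP (same O(n) cost); equivalence is proved on Pre_ (see the comment at Pre_mostPoints for what it excludes and why).

-- ===== PORT A =====
-- loop body of A's 'for i in range(len(questions)-1,-1,-1)'; state = (dp, max_sum)
def stepA (questions : List (List Int)) (st : List Int × Int) (i : Int) : List Int × Int :=
  let dp := st.1
  let maxSum := st.2
  let qi := PySem.List.pyGetD questions i []                       -- questions[i]
  let future := PySem.List.pyGetD qi 1 0 + 1 + i                   -- questions[i][1]+1+i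
  let v := if future ≥ (questions.length : Int)
           then PySem.List.pyGetD qi 0 0                            -- dp[i]=questions[i][0]
           else PySem.List.pyGetD qi 0 0 + PySem.List.pyGetD dp future 0  -- dp[i]=questions[i][0]+dp[future]
  let maxSum := max maxSum v                                       -- max_sum=max(max_sum,dp[i])
  let dp := PySem.List.pySetD dp i v
  let dp := PySem.List.pySetD dp i
              (max (PySem.List.pyGetD dp i 0) (PySem.List.pyGetD dp (i + 1) 0))  -- dp[i]=max(dp[i],dp[i+1])
  (dp, maxSum)

def mostPoints (questions : List (List Int)) : Int :=
  ((PySem.List.pyRange ((questions.length : Int) - 1) (-1) (-1)).foldl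
      (stepA questions)
      (List.replicate (questions.length + 1) 0, 0)).2

-- ===== PORT B =====
-- loop body of B's 'for i, q in enumerate(questions)'
def stepB (n : Nat) (dp : List Int) (iq : Int × List Int) : List Int :=
  let i := iq.1
  let q := iq.2
  let dp := if PySem.List.pyGetD dp i 0 > PySem.List.pyGetD dp (i + 1) 0
            then PySem.List.pySetD dp (i + 1) (PySem.List.pyGetD dp i 0)       -- dp[i+1] = dp[i]
            else dp
  let j := min (n : Int) (i + PySem.List.pyGetD q 1 0 + 1)                     -- j = min(n, i+q[1]+1)
  let t := PySem.List.pyGetD dp i 0 + PySem.List.pyGetD q 0 0                  -- t = dp[i] + q[0]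
  if t > PySem.List.pyGetD dp j 0 then PySem.List.pySetD dp j t else dp        -- dp[j] = t

def mostPoints_alt (questions : List (List Int)) : Int :=
  let n := questions.length
  let dp := (PySem.List.enumerate questions 0).foldl (stepB n) (List.replicate (n + 1) 0)
  PySem.List.pyGetD dp (n : Int) 0

-- ===== PRECONDITION & SPEC =====
-- Pre_ excludes rows with fewer than two entries and rows whose negative brainpower makes the
-- jump index fall below -(n+1) (on both kinds A raises IndexError), and rows with negative
-- brainpower together with positive points, where A's returned value is an artefact of Python
-- negative-index wraparound / of reading still-unset dp cells backwards.
def Pre_mostPoints (questions : List (List Int)) : Prop :=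
  ∀ k, k < questions.length →
    2 ≤ (questions.getD k []).length ∧
    (0 ≤ (questions.getD k []).getD 1 0 ∨
      ((questions.getD k []).getD 0 0 ≤ 0 ∧
        0 ≤ (questions.getD k []).getD 1 0 + (k : Int) + 2 + (questions.length : Int)))

instance (questions : List (List Int)) : Decidable (Pre_mostPoints questions) := by
  unfold Pre_mostPoints; infer_instance

def pvWitness_mostPoints : List (List Int) := [[3, 2], [4, 3], [4, 4], [2, 5]]

def Spec_mostPoints (questions : List (List Int)) (out : Int) : Prop := out = mostPoints_alt questions
instance (questions : List (List Int)) (out : Int) : Decidable (Spec_mostPoints questions out) := by unfold Spec_mostPoints; infer_instance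

-- ===== CLAIM (what is proved, stated in full; the proofs are below) =====
def Claim_equal_mostPoints : Prop := ∀ (questions : List (List Int)), Dom_mostPoints questions → Pre_mostPoints questions → Spec_mostPoints questions (mostPoints questions)

-- ===== LEMMAS AND PROOFS =====

-- best qs i = the optimum obtainable from questions i..n-1 (0 for i ≥ n)
def best (qs : List (List Int)) (i : Nat) : Int :=
  if _h : i < qs.length then
    if 0 ≤ (qs.getD i []).getD 1 0 then
      max (best qs (i + 1))
          ((qs.getD i []).getD 0 0 + best qs (i + 1 + ((qs.getD i []).getD 1 0).toNat))
    else best qs (i + 1)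
  else 0
termination_by qs.length - i

theorem best_ge (qs : List (List Int)) (i : Nat) (h : qs.length ≤ i) : best qs i = 0 := by
  unfold best; rw [dif_neg (by omega)]

theorem best_succ_le (qs : List (List Int)) (i : Nat) : best qs (i + 1) ≤ best qs i := by
  by_cases h : i < qs.length
  · conv_rhs => unfold best
    rw [dif_pos h]
    by_cases hb : 0 ≤ (qs.getD i []).getD 1 0
    · rw [if_pos hb]; exact le_max_left _ _
    · rw [if_neg hb]
  · rw [best_ge qs i (by omega), best_ge qs (i + 1) (by omega)]

theorem best_le_of_le (qs : List (List Int)) (i j : Nat) (h : i ≤ j) :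
    best qs j ≤ best qs i := by
  induction j, h using Nat.le_induction with
  | base => exact le_rfl
  | succ j _hij ih => exact le_trans (best_succ_le qs j) ih

theorem best_nonneg (qs : List (List Int)) (i : Nat) : 0 ≤ best qs i := by
  by_cases h : i ≤ qs.length
  · have h2 := best_le_of_le qs i qs.length h
    rw [best_ge qs qs.length le_rfl] at h2
    exact h2
  · rw [best_ge qs i (by omega)]

theorem pyGetD_neg' (xs : List Int) (k : Nat) (d : Int) (h1 : 0 < k) (h2 : k ≤ xs.length) :
    PySem.List.pyGetD xs (-(k : Int)) d = xs.getD (xs.length - k) d := by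
  rw [PySem.List.pyGetD_neg_natCast _ _ _ h1 h2, List.getD_eq_getElem _ _ (by omega)]

theorem pySetD_neg' (xs : List Int) (k : Nat) (v : Int) (h1 : 0 < k) (h2 : k ≤ xs.length) :
    PySem.List.pySetD xs (-(k : Int)) v = xs.set (xs.length - k) v := by
  simp only [PySem.List.pySetD, PySem.List.pySet?, PySem.List.pyIdx?]
  rw [if_neg (by omega), if_pos (by omega)]
  simp only [Option.map_some, Option.getD_some]
  congr 1
  omega

-- closed form for A's dp array after processing indices down to i
def dpL (qs : List (List Int)) (i : Nat) : List Int :=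
  (List.range (qs.length + 1)).map (fun k => if k < i then 0 else best qs k)

theorem length_dpL (qs : List (List Int)) (i : Nat) : (dpL qs i).length = qs.length + 1 := by
  simp [dpL]

theorem getD_dpL (qs : List (List Int)) (i k : Nat) (hk : k < qs.length + 1) :
    (dpL qs i).getD k 0 = if k < i then 0 else best qs k := by
  simp [dpL, List.getD, List.getElem?_map, List.getElem?_range hk]

theorem getD_set (dp : List Int) (k m : Nat) (v : Int) :
    (dp.set k v).getD m 0 = if m = k ∧ k < dp.length then v else dp.getD m 0 := by
  simp only [List.getD, List.getElem?_set]
  split_ifs with h1 h2 h3 <;> simp_all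

theorem getElem_dpL (qs : List (List Int)) (i k : Nat) (_hk : k < (dpL qs i).length) :
    (dpL qs i)[k] = if k < i then 0 else best qs k := by
  simp [dpL]

theorem dpL_set (qs : List (List Int)) (i : Nat) (_hi : i < qs.length) :
    (dpL qs (i + 1)).set i (best qs i) = dpL qs i := by
  apply List.ext_getElem (by simp [dpL])
  intro k hk1 hk2
  rw [List.getElem_set, getElem_dpL qs i k hk2]
  by_cases hik : i = k
  · subst hik
    rw [if_pos rfl, if_neg (lt_irrefl i)]
  · rw [if_neg hik, getElem_dpL qs (i + 1) k (by simpa using hk1)]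
    by_cases hlt : k < i
    · rw [if_pos (by omega), if_pos hlt]
    · rw [if_neg (by omega), if_neg hlt]

theorem dpL_top (qs : List (List Int)) :
    dpL qs qs.length = List.replicate (qs.length + 1) (0 : Int) := by
  apply List.ext_getElem (by simp [dpL])
  intro k hk1 hk2
  rw [getElem_dpL qs qs.length k hk1, List.getElem_replicate]
  by_cases hk : k < qs.length
  · rw [if_pos hk]
  · rw [if_neg hk, best_ge qs k (by omega)]

theorem stepA_key (qs : List (List Int)) (hP : Pre_mostPoints qs) (i : Nat) (hi : i < qs.length) :
    stepA qs (dpL qs (i + 1), best qs (i + 1)) ((i : Nat) : Int) = (dpL qs i, best qs i) := by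
  obtain ⟨-, hbp⟩ := hP i hi
  simp only [stepA, PySem.List.pyGetD_natCast, PySem.List.pyGetD_ofNat',
    PySem.List.pySetD_natCast]
  set q : List Int := qs.getD i [] with hqdef
  set b : Int := q.getD 1 0 with hbdef
  set p : Int := q.getD 0 0 with hpdef
  have hsets : ∀ v : Int,
      ((dpL qs (i + 1)).set i v).set i
          (max (((dpL qs (i + 1)).set i v).getD i 0)
               (PySem.List.pyGetD ((dpL qs (i + 1)).set i v) ((i : Int) + 1) 0))
        = (dpL qs (i + 1)).set i (max v (best qs (i + 1))) := by
    intro v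
    rw [show ((i : Int) + 1) = (((i + 1 : Nat)) : Int) by push_cast; ring,
        PySem.List.pyGetD_natCast,
        getD_set, if_pos ⟨rfl, by rw [length_dpL]; omega⟩,
        getD_set, if_neg (by omega),
        getD_dpL qs (i + 1) (i + 1) (by omega), if_neg (lt_irrefl (i + 1)),
        List.set_set]
  by_cases hb' : 0 ≤ b
  · have hfut : b + 1 + (i : Int) = (((i + 1 + b.toNat : Nat)) : Int) := by
      push_cast [Int.toNat_of_nonneg hb']; ring
    have hbest_s : best qs i = max (best qs (i + 1)) (p + best qs (i + 1 + b.toNat)) := by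
      conv_lhs => unfold best
      rw [dif_pos hi,
          if_pos (show (0:Int) ≤ (qs.getD i []).getD 1 0 by rw [← hqdef, ← hbdef]; exact hb'),
          hpdef, hbdef, hqdef]
    rw [hfut]
    by_cases hc : qs.length ≤ i + 1 + b.toNat
    · rw [if_pos (show (((i + 1 + b.toNat : Nat)) : Int) ≥ ((qs.length : Int)) by
          exact_mod_cast hc)]
      have h0 : best qs (i + 1 + b.toNat) = 0 := best_ge qs _ hc
      rw [hsets p, Prod.mk.injEq]
      constructor
      · rw [show max p (best qs (i + 1)) = best qs i by rw [hbest_s, h0]; omega,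
            dpL_set qs i hi]
      · rw [hbest_s, h0]; omega
    · rw [if_neg (show ¬ ((((i + 1 + b.toNat : Nat)) : Int) ≥ ((qs.length : Int))) by
          push_cast; omega),
          PySem.List.pyGetD_natCast,
          getD_dpL qs (i + 1) (i + 1 + b.toNat) (by omega), if_neg (by omega)]
      rw [hsets (p + best qs (i + 1 + b.toNat)), Prod.mk.injEq]
      constructor
      · rw [show max (p + best qs (i + 1 + b.toNat)) (best qs (i + 1)) = best qs i by
            rw [hbest_s]; omega,
            dpL_set qs i hi]
      · rw [hbest_s]
  · obtain ⟨hple, hbound⟩ : p ≤ 0 ∧ 0 ≤ b + (i : Int) + 2 + (qs.length : Int) := by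
      rcases hbp with h | h
      · exact absurd h hb'
      · exact ⟨h.1, by omega⟩
    have hbest_s : best qs i = best qs (i + 1) := by
      conv_lhs => unfold best
      rw [dif_pos hi,
          if_neg (show ¬ ((0:Int) ≤ (qs.getD i []).getD 1 0) by rw [← hqdef, ← hbdef]; exact hb')]
    rw [if_neg (show ¬ (b + 1 + (i : Int) ≥ ((qs.length : Int))) by omega)]
    have hr : 0 ≤ PySem.List.pyGetD (dpL qs (i + 1)) (b + 1 + (i : Int)) 0 ∧
        PySem.List.pyGetD (dpL qs (i + 1)) (b + 1 + (i : Int)) 0 ≤ best qs (i + 1) := by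
      by_cases hf : 0 ≤ b + 1 + (i : Int)
      · rw [show b + 1 + (i : Int) = (((b + 1 + (i : Int)).toNat : Nat) : Int) by omega,
            PySem.List.pyGetD_natCast,
            getD_dpL qs (i + 1) (b + 1 + (i : Int)).toNat (by omega), if_pos (by omega)]
        exact ⟨le_rfl, best_nonneg qs (i + 1)⟩
      · have hk0 : 0 < (-(b + 1 + (i : Int))).toNat := by omega
        have hk1 : (-(b + 1 + (i : Int))).toNat ≤ (dpL qs (i + 1)).length := by
          rw [length_dpL]; omega
        rw [show b + 1 + (i : Int) = -(((-(b + 1 + (i : Int))).toNat : Nat) : Int) by omega,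
            pyGetD_neg' _ _ _ hk0 hk1, length_dpL,
            getD_dpL qs (i + 1) _ (by omega)]
        by_cases hlt : qs.length + 1 - (-(b + 1 + (i : Int))).toNat < i + 1
        · rw [if_pos hlt]
          exact ⟨le_rfl, best_nonneg qs (i + 1)⟩
        · rw [if_neg hlt]
          exact ⟨best_nonneg qs _, best_le_of_le qs (i + 1) _ (by omega)⟩
    set r : Int := PySem.List.pyGetD (dpL qs (i + 1)) (b + 1 + (i : Int)) 0 with hrdef
    have hvle : p + r ≤ best qs (i + 1) := by omega
    rw [hsets (p + r), Prod.mk.injEq]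
    constructor
    · rw [max_eq_right hvle, ← hbest_s, dpL_set qs i hi]
    · rw [max_eq_left hvle, hbest_s]

theorem foldA (qs : List (List Int)) (hP : Pre_mostPoints qs) :
    ∀ (i : Nat), i ≤ qs.length →
      ((PySem.List.pyRange ((i : Int) - 1) (-1) (-1)).foldl (stepA qs) (dpL qs i, best qs i))
        = (dpL qs 0, best qs 0) := by
  intro i
  induction i with
  | zero =>
    intro _
    rw [show (((0 : Nat) : Int) - 1) = (-1 : Int) by norm_num,
        PySem.List.pyRange_neg_one_eq_nil (le_refl (-1)), List.foldl_nil]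
  | succ i ih =>
    intro hle
    rw [show (((i + 1 : Nat) : Int) - 1) = ((i : Nat) : Int) by push_cast; ring,
        PySem.List.pyRange_neg_one_cons (by omega), List.foldl_cons,
        stepA_key qs hP i (by omega), ih (by omega)]

-- maximum over k ∈ [i..n] of dp[k] + best k (B's loop invariant functional)
def gmax (qs : List (List Int)) (dp : List Int) (i : Nat) : Int :=
  if _h : i < qs.length then
    max (dp.getD i 0 + best qs i) (gmax qs dp (i + 1))
  else dp.getD qs.length 0
termination_by qs.length - i

theorem gmax_set_lt (qs : List (List Int)) (dp : List Int) (i k : Nat) (v : Int)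
    (hk : k < i) (hkn : k < qs.length) :
    gmax qs (dp.set k v) i = gmax qs dp i := by
  have H : ∀ (m i : Nat), qs.length - i ≤ m → k < i →
      gmax qs (dp.set k v) i = gmax qs dp i := by
    intro m
    induction m with
    | zero =>
      intro i him hki
      unfold gmax
      rw [dif_neg (by omega), dif_neg (by omega), getD_set, if_neg (by omega)]
    | succ m ih =>
      intro i him hki
      by_cases h : i < qs.length
      · unfold gmax
        rw [dif_pos h, dif_pos h, getD_set, if_neg (by omega), ih (i + 1) (by omega) (by omega)]
      · unfold gmax
        rw [dif_neg h, dif_neg h, getD_set, if_neg (by omega)]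
  exact H (qs.length - i) i le_rfl hk

theorem gmax_set (qs : List (List Int)) (dp : List Int) (i k : Nat) (v : Int)
    (hik : i ≤ k) (hkn : k ≤ qs.length) (hlen : dp.length = qs.length + 1) :
    gmax qs (dp.set k (max (dp.getD k 0) v)) i = max (gmax qs dp i) (v + best qs k) := by
  have H : ∀ (m i : Nat), qs.length - i ≤ m → i ≤ k →
      gmax qs (dp.set k (max (dp.getD k 0) v)) i = max (gmax qs dp i) (v + best qs k) := by
    intro m
    induction m with
    | zero =>
      intro i him hik
      have hkk : k = qs.length := by omega
      unfold gmax
      rw [dif_neg (by omega), dif_neg (by omega), getD_set, if_pos (by omega)]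
      rw [hkk, best_ge qs qs.length le_rfl]
      omega
    | succ m ih =>
      intro i him hik
      by_cases h : i < qs.length
      · by_cases hki : k = i
        · subst hki
          unfold gmax
          rw [dif_pos h, dif_pos h, getD_set, if_pos (by omega),
              gmax_set_lt qs dp (k + 1) k _ (by omega) h]
          omega
        · unfold gmax
          rw [dif_pos h, dif_pos h, getD_set, if_neg (by omega), ih (i + 1) (by omega) (by omega)]
          omega
      · have hkk : k = qs.length := by omega
        unfold gmax
        rw [dif_neg h, dif_neg h, getD_set, if_pos (by omega)]
        rw [hkk, best_ge qs qs.length le_rfl]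
        omega
  exact H (qs.length - i) i le_rfl hik

theorem gmax_replicate (qs : List (List Int)) :
    ∀ (i : Nat), i ≤ qs.length → gmax qs (List.replicate (qs.length + 1) 0) i = best qs i := by
  have H : ∀ (m i : Nat), qs.length - i ≤ m → i ≤ qs.length →
      gmax qs (List.replicate (qs.length + 1) 0) i = best qs i := by
    intro m
    induction m with
    | zero =>
      intro i him hin
      have : i = qs.length := by omega
      subst this
      unfold gmax
      rw [dif_neg (by omega), best_ge qs qs.length le_rfl]
      simp [List.getD]
    | succ m ih =>
      intro i him hin
      by_cases h : i < qs.length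
      · unfold gmax
        rw [dif_pos h, ih (i + 1) (by omega) (by omega)]
        have h0 : (List.replicate (qs.length + 1) (0 : Int)).getD i 0 = 0 := by
          have hi1 : i < qs.length + 1 := by omega
          simp [List.getD, hi1]
        rw [h0, zero_add]
        exact max_eq_left (best_succ_le qs i)
      · have : i = qs.length := by omega
        subst this
        unfold gmax
        rw [dif_neg (by omega), best_ge qs qs.length le_rfl]
        simp [List.getD]
  intro i hi
  exact H (qs.length - i) i le_rfl hi

theorem gmax_ge (qs : List (List Int)) (dp : List Int) (i k : Nat)
    (hik : i ≤ k) (hkn : k ≤ qs.length) :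
    dp.getD k 0 + best qs k ≤ gmax qs dp i := by
  have H : ∀ (m i : Nat), qs.length - i ≤ m → i ≤ k →
      dp.getD k 0 + best qs k ≤ gmax qs dp i := by
    intro m
    induction m with
    | zero =>
      intro i him hik'
      have hkk : k = qs.length := by omega
      unfold gmax
      rw [dif_neg (by omega), hkk, best_ge qs qs.length le_rfl]
      omega
    | succ m ih =>
      intro i him hik'
      by_cases h : i < qs.length
      · unfold gmax
        rw [dif_pos h]
        by_cases hki : k = i
        · subst hki
          exact le_max_of_le_left le_rfl
        · exact le_max_of_le_right (ih (i + 1) (by omega) (by omega))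
      · have hkk : k = qs.length := by omega
        unfold gmax
        rw [dif_neg (by omega), hkk, best_ge qs qs.length le_rfl]
        omega
  exact H (qs.length - i) i le_rfl hik

theorem length_stepB (n : Nat) (dp : List Int) (iq : Int × List Int) :
    (stepB n dp iq).length = dp.length := by
  simp only [stepB]
  split_ifs <;> simp [PySem.List.length_pySetD]

theorem stepB_key (qs : List (List Int)) (hP : Pre_mostPoints qs) (dp : List Int) (s : Nat)
    (hs : s < qs.length) (hlen : dp.length = qs.length + 1) :
    gmax qs (stepB qs.length dp ((s : Int), qs.getD s [])) (s + 1) = gmax qs dp s := by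
  obtain ⟨-, hbp⟩ := hP s hs
  set q : List Int := qs.getD s [] with hqdef
  set b : Int := q.getD 1 0 with hbdef
  set p : Int := q.getD 0 0 with hpdef
  have hcast1 : ((s : Int) + 1) = (((s + 1 : Nat)) : Int) := by push_cast; ring
  -- the first conditional assignment is a set to the running max
  have hstep1 : (if PySem.List.pyGetD dp (s : Int) 0 > PySem.List.pyGetD dp ((s : Int) + 1) 0
        then PySem.List.pySetD dp ((s : Int) + 1) (PySem.List.pyGetD dp (s : Int) 0) else dp)
      = dp.set (s + 1) (max (dp.getD (s + 1) 0) (dp.getD s 0)) := by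
    rw [hcast1, PySem.List.pyGetD_natCast, PySem.List.pyGetD_natCast, PySem.List.pySetD_natCast]
    split_ifs with hgt
    · rw [max_eq_right (le_of_lt hgt)]
    · rw [max_eq_left (by omega), List.getD_eq_getElem dp 0 (by omega),
          List.set_getElem_self]
  set dp1 : List Int := dp.set (s + 1) (max (dp.getD (s + 1) 0) (dp.getD s 0)) with hdp1
  have hlen1 : dp1.length = qs.length + 1 := by rw [hdp1, List.length_set, hlen]
  have hdp1s : dp1.getD s 0 = dp.getD s 0 := by
    rw [hdp1, getD_set, if_neg (by omega)]
  by_cases hb' : 0 ≤ b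
  · -- nonnegative brainpower: the push lands at min(n, s+1+b)
    set jN : Nat := min qs.length (s + 1 + b.toNat) with hjN
    have hj : min ((qs.length : Nat) : Int) ((s : Int) + b + 1) = ((jN : Nat) : Int) := by
      rw [hjN]; push_cast [Int.toNat_of_nonneg hb']; omega
    have hstep2 : ∀ t : Int, (if t > PySem.List.pyGetD dp1 ((jN : Nat) : Int) 0
          then PySem.List.pySetD dp1 ((jN : Nat) : Int) t else dp1)
        = dp1.set jN (max (dp1.getD jN 0) t) := by
      intro t
      rw [PySem.List.pyGetD_natCast, PySem.List.pySetD_natCast]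
      split_ifs with hgt
      · rw [max_eq_right (le_of_lt hgt)]
      · rw [max_eq_left (by omega), List.getD_eq_getElem dp1 0 (by omega),
            List.set_getElem_self]
    have hbestj : best qs jN = best qs (s + 1 + b.toNat) := by
      by_cases hc : s + 1 + b.toNat ≤ qs.length
      · rw [hjN, min_eq_right hc]
      · rw [hjN, min_eq_left (by omega), best_ge qs qs.length le_rfl,
            best_ge qs (s + 1 + b.toNat) (by omega)]
    have hbest_s : best qs s = max (best qs (s + 1)) (p + best qs (s + 1 + b.toNat)) := by
      conv_lhs => unfold best
      rw [dif_pos hs,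
          if_pos (show (0:Int) ≤ (qs.getD s []).getD 1 0 by rw [← hqdef, ← hbdef]; exact hb'),
          hpdef, hbdef, hqdef]
    simp only [stepB]
    rw [PySem.List.pyGetD_ofNat', PySem.List.pyGetD_ofNat', hstep1]
    rw [← hbdef, ← hpdef, hj, PySem.List.pyGetD_natCast, hstep2, hdp1s]
    rw [gmax_set qs dp1 (s + 1) jN (dp.getD s 0 + p) (by omega) (by omega) hlen1]
    rw [hdp1, gmax_set qs dp (s + 1) (s + 1) (dp.getD s 0) le_rfl (by omega) hlen]
    conv_rhs => unfold gmax
    rw [dif_pos hs, hbestj, hbest_s]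
    omega
  · -- negative brainpower (points ≤ 0 under Pre_): the push is provably irrelevant
    obtain ⟨hple, hbound⟩ : p ≤ 0 ∧ 0 ≤ b + (s : Int) + 2 + (qs.length : Int) := by
      rcases hbp with h | h
      · exact absurd h hb'
      · exact ⟨h.1, by omega⟩
    have hbest_s : best qs s = best qs (s + 1) := by
      conv_lhs => unfold best
      rw [dif_pos hs,
          if_neg (show ¬ ((0:Int) ≤ (qs.getD s []).getD 1 0) by rw [← hqdef, ← hbdef]; exact hb')]
    have hG1 : gmax qs dp1 (s + 1) = gmax qs dp s := by
      rw [hdp1, gmax_set qs dp (s + 1) (s + 1) (dp.getD s 0) le_rfl (by omega) hlen]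
      conv_rhs => unfold gmax
      rw [dif_pos hs, hbest_s]
      omega
    have hj : min ((qs.length : Nat) : Int) ((s : Int) + b + 1) = (s : Int) + b + 1 :=
      min_eq_right (by omega)
    simp only [stepB]
    rw [PySem.List.pyGetD_ofNat', PySem.List.pyGetD_ofNat', hstep1]
    rw [← hbdef, ← hpdef, hj, PySem.List.pyGetD_natCast, hdp1s]
    set jI : Int := (s : Int) + b + 1 with hjI
    set t : Int := dp.getD s 0 + p with htdef
    by_cases hjpos : 0 ≤ jI
    · rw [show jI = ((jI.toNat : Nat) : Int) by omega,
          PySem.List.pyGetD_natCast, PySem.List.pySetD_natCast]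
      have hconv : (if t > dp1.getD jI.toNat 0 then dp1.set jI.toNat t else dp1)
          = dp1.set jI.toNat (max (dp1.getD jI.toNat 0) t) := by
        split_ifs with hgt
        · rw [max_eq_right (le_of_lt hgt)]
        · rw [max_eq_left (by omega), List.getD_eq_getElem dp1 0 (by rw [hlen1]; omega),
              List.set_getElem_self]
      rw [hconv, gmax_set_lt qs dp1 (s + 1) jI.toNat _ (by omega) (by omega)]
      exact hG1
    · have hk0 : 0 < (-jI).toNat := by omega
      have hk1 : (-jI).toNat ≤ dp1.length := by rw [hlen1]; omega
      rw [show jI = -(((-jI).toNat : Nat) : Int) by omega,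
          pyGetD_neg' _ _ _ hk0 hk1, pySetD_neg' _ _ _ hk0 hk1]
      set m : Nat := dp1.length - (-jI).toNat with hm
      have hmn : m ≤ qs.length := by rw [hm, hlen1]; omega
      have hconv : (if t > dp1.getD m 0 then dp1.set m t else dp1)
          = dp1.set m (max (dp1.getD m 0) t) := by
        split_ifs with hgt
        · rw [max_eq_right (le_of_lt hgt)]
        · rw [max_eq_left (by omega), List.getD_eq_getElem dp1 0 (by rw [hm]; omega),
              List.set_getElem_self]
      rw [hconv]
      by_cases hms : m ≤ s
      · rw [gmax_set_lt qs dp1 (s + 1) m _ (by omega) (by omega)]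
        exact hG1
      · rw [gmax_set qs dp1 (s + 1) m t (by omega) hmn hlen1, hG1]
        have h1 : dp1.getD (s + 1) 0 + best qs (s + 1) ≤ gmax qs dp1 (s + 1) :=
          gmax_ge qs dp1 (s + 1) (s + 1) le_rfl (by omega)
        have h2 : dp.getD s 0 ≤ dp1.getD (s + 1) 0 := by
          rw [hdp1, getD_set, if_pos ⟨rfl, by omega⟩]
          exact le_max_right _ _
        have h3 : best qs m ≤ best qs (s + 1) := best_le_of_le qs (s + 1) m (by omega)
        have hle : t + best qs m ≤ gmax qs dp s := by rw [← hG1]; omega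
        exact max_eq_left hle

theorem foldB (qs : List (List Int)) (hP : Pre_mostPoints qs) :
    ∀ (rest : List (List Int)) (s : Nat) (dp : List Int),
      s + rest.length = qs.length → rest = qs.drop s → dp.length = qs.length + 1 →
      gmax qs ((PySem.List.enumerate rest (s : Int)).foldl (stepB qs.length) dp) qs.length
        = gmax qs dp s := by
  intro rest
  induction rest with
  | nil =>
    intro s dp hsum hdrop hlen
    have hs : s = qs.length := by simpa using hsum
    rw [PySem.List.enumerate_nil, List.foldl_nil, hs]
  | cons q' rest' ih =>
    intro s dp hsum hdrop hlen
    have hs : s < qs.length := by simp at hsum; omega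
    have hq' : q' = qs.getD s [] := by
      have h0 : (qs.drop s)[0]? = some q' := by rw [← hdrop]; rfl
      rw [List.getElem?_drop, Nat.add_zero] at h0
      simp [List.getD, h0]
    have hrest : rest' = qs.drop (s + 1) := by
      have ht : (qs.drop s).tail = rest' := by rw [← hdrop]; rfl
      rw [← ht, List.tail_drop]
    rw [PySem.List.enumerate_cons, List.foldl_cons,
        show ((s : Int) + 1) = (((s + 1 : Nat)) : Int) by push_cast; ring,
        ih (s + 1) (stepB qs.length dp ((s : Int), q')) (by simp at hsum ⊢; omega) hrest
          (by rw [length_stepB, hlen]),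
        hq', stepB_key qs hP dp s hs hlen]

theorem A_eq_best (qs : List (List Int)) (hP : Pre_mostPoints qs) : mostPoints qs = best qs 0 := by
  simp only [mostPoints]
  rw [show (List.replicate (qs.length + 1) (0 : Int), (0 : Int))
        = (dpL qs qs.length, best qs qs.length) by
      rw [dpL_top qs, best_ge qs qs.length le_rfl],
      foldA qs hP qs.length le_rfl]

theorem B_eq_best (qs : List (List Int)) (hP : Pre_mostPoints qs) : mostPoints_alt qs = best qs 0 := by
  have h := foldB qs hP qs 0 (List.replicate (qs.length + 1) 0) (by omega) (by simp) (by simp)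
  rw [gmax_replicate qs 0 (Nat.zero_le _)] at h
  conv at h => lhs; unfold gmax
  rw [dif_neg (lt_irrefl _)] at h
  norm_num at h
  simp only [mostPoints_alt, PySem.List.pyGetD_natCast]
  simp [List.getD] at h ⊢
  exact h

-- ===== VERDICT (by name: the statement is the Claim_ definition above) =====
theorem mostPoints_spec : Claim_equal_mostPoints := by
  intro qs _hD hP
  unfold Spec_mostPoints
  rw [A_eq_best qs hP, B_eq_best qs hP]
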